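-- pv_equiv track=rewrite | github.com/simoRancati/DeepAutoCoV | Simulation/DeepAutoCov/utils_DeepAutoCov.py | count_true_and_false_positives_top100
-- ===== SOURCE A (Python) =====
-- def count_true_and_false_positives_top100(predicted_lineages, known_lineages):
--     """
--     Counts the true positives and false positives in a list of predicted lineages,
--     making it robust to spaces in lineage names.
--
--     A true positive is a lineage that is either present in the list of known lineages or is a sublineage of a known element.
--     A false positive is a lineage that does not meet the criteria to be a true positive.
--
--     :param predicted_lineages: List of predicted lineages.
--     :param known_lineages: List of known lineages.
--     :return: A tuple (true_positives, false_positives).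
--     """
--     true_positives = 0
--     false_positives = 0
--
--     # Clean up spaces in the lineages lists
--     cleaned_predicted_lineages = [lineage.strip() for lineage in predicted_lineages]
--     cleaned_known_lineages = [lineage.strip() for lineage in known_lineages]
--
--     for predicted in cleaned_predicted_lineages:
--         if any(predicted.startswith(known) for known in cleaned_known_lineages):
--             true_positives += 1
--         else:
--             false_positives += 1
--
--     return true_positives, false_positives
-- ===== SOURCE B (Python) =====
-- def count_true_and_false_positives_top100(predicted_lineages, known_lineages):
--     # Build a hash set of the cleaned known lineages once, then walk each
--     # predicted lineage testing its prefixes against the set.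
--     known = {k.strip() for k in known_lineages}
--     true_positives = 0
--     for lineage in predicted_lineages:
--         p = lineage.strip()
--         if any(p[:i] in known for i in range(len(p) + 1)):
--             true_positives += 1
--     return true_positives, len(predicted_lineages) - true_positives
-- ===== Notes on version B (the rewrite author's own statement) =====
-- stated objective: faster
-- what changed: Instead of scanning every known lineage for each prediction, B builds a hash set of cleaned known lineages once and tests each prediction's prefixes for membership, counting false positives as length minus true positives.
import Mathlib
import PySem

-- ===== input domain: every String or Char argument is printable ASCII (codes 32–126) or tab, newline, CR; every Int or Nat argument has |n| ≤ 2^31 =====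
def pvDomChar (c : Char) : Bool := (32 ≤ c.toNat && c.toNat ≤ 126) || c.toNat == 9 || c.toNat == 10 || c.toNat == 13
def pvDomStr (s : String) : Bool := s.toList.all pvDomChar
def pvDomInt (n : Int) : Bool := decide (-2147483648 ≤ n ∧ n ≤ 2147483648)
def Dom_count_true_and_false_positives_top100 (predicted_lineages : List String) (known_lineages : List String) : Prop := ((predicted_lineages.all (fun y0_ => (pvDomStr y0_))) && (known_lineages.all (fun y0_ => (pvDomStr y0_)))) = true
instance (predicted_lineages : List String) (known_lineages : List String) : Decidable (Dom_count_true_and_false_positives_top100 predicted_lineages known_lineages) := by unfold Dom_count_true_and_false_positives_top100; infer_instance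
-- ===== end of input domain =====

-- B replaces A's inner scan of every known lineage per prediction by a hash set of
-- known lineages probed with each prediction's prefixes (objective: faster).

-- ===== PORT A =====
def count_true_and_false_positives_top100 (predicted_lineages : List String) (known_lineages : List String) : Int × Int :=
  -- true_positives = 0; false_positives = 0
  let cleaned_predicted_lineages := predicted_lineages.map (fun lineage => PySem.Str.strip lineage)
  let cleaned_known_lineages := known_lineages.map (fun lineage => PySem.Str.strip lineage)
  let tf : Int × Int := cleaned_predicted_lineages.foldl
    (fun acc predicted =>
      if cleaned_known_lineages.any (fun known => PySem.Str.startswith predicted known) then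
        (acc.1 + 1, acc.2)
      else
        (acc.1, acc.2 + 1))
    (0, 0)
  tf

-- ===== PORT B =====
def count_true_and_false_positives_top100_alt (predicted_lineages : List String) (known_lineages : List String) : Int × Int :=
  let known : PySem.Set String := PySem.Set.ofList (known_lineages.map (fun k => PySem.Str.strip k))
  let true_positives : Int := predicted_lineages.foldl
    (fun true_positives lineage =>
      let p := PySem.Str.strip lineage
      if (PySem.List.pyRange 0 (PySem.Str.len p + 1)).any
          (fun i => known.contains (PySem.Str.slice p none (some i))) then
        true_positives + 1
      else
        true_positives)
    0
  (true_positives, (predicted_lineages.length : Int) - true_positives)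

-- ===== PRECONDITION & SPEC =====
def Spec_count_true_and_false_positives_top100 (predicted_lineages : List String) (known_lineages : List String) (out : Int × Int) : Prop := out = count_true_and_false_positives_top100_alt predicted_lineages known_lineages
instance (predicted_lineages : List String) (known_lineages : List String) (out : Int × Int) : Decidable (Spec_count_true_and_false_positives_top100 predicted_lineages known_lineages out) := by unfold Spec_count_true_and_false_positives_top100; infer_instance

-- ===== CLAIM (what is proved, stated in full; the proofs are below) =====
def Claim_equal_count_true_and_false_positives_top100 : Prop := ∀ (predicted_lineages : List String) (known_lineages : List String), Dom_count_true_and_false_positives_top100 predicted_lineages known_lineages → Spec_count_true_and_false_positives_top100 predicted_lineages known_lineages (count_true_and_false_positives_top100 predicted_lineages known_lineages)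

-- ===== LEMMAS AND PROOFS =====

-- A's per-prediction test (some known is a prefix) coincides with B's
-- (some prefix of the prediction is in the set of knowns).
theorem pv_hit_eq (p : String) (ck : List String) :
    ck.any (fun known => PySem.Str.startswith p known)
      = (PySem.List.pyRange 0 (PySem.Str.len p + 1)).any
          (fun i => (PySem.Set.ofList ck).contains (PySem.Str.slice p none (some i))) := by
  rw [Bool.eq_iff_iff]
  simp only [List.any_eq_true, PySem.Str.startswith_eq, PySem.Chars.startswith_iff,
    PySem.Set.contains_iff, PySem.Set.mem_ofList, PySem.List.mem_pyRange_one]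
  constructor
  · rintro ⟨k, hk, hpre⟩
    refine ⟨(k.toList.length : Int), ⟨by positivity, ?_⟩, ?_⟩
    · have := hpre.length_le
      rw [PySem.Str.len_eq]; omega
    · have hslice : (PySem.Str.slice p none (some (k.toList.length : Int))).toList = k.toList := by
        rw [PySem.Str.toList_slice, PySem.Chars.slice_eq_listSlice,
          PySem.List.slice_to_natCast]
        exact (List.prefix_iff_eq_take.mp hpre).symm
      rw [String.toList_inj] at hslice
      rw [hslice]; exact hk
  · rintro ⟨i, ⟨h0, _⟩, hmem⟩
    refine ⟨PySem.Str.slice p none (some i), hmem, ?_⟩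
    rw [PySem.Str.toList_slice, PySem.Chars.slice_eq_listSlice, PySem.List.slice_to _ h0]
    exact List.take_prefix _ _

theorem pv_foldl_count {α : Type} (q : α → Bool) :
    ∀ (l : List α) (c : Int),
      l.foldl (fun tp x => if q x then tp + 1 else tp) c = c + (l.countP q : Int) := by
  intro l
  induction l with
  | nil => intro c; simp
  | cons x xs ih =>
    intro c
    simp only [List.foldl_cons, List.countP_cons, ih]
    by_cases h : q x = true <;> simp [h] <;> omega

theorem pv_foldl_pair {α : Type} (r : α → Bool) :
    ∀ (l : List α) (a b : Int),
      l.foldl (fun acc x => if r x then (acc.1 + 1, acc.2) else (acc.1, acc.2 + 1)) (a, b)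
        = (a + (l.countP r : Int), b + ((l.length : Int) - (l.countP r : Int))) := by
  intro l
  induction l with
  | nil => intro a b; simp
  | cons x xs ih =>
    intro a b
    simp only [List.foldl_cons, List.countP_cons, List.length_cons]
    by_cases h : r x = true <;> simp only [h, if_true, if_false, Bool.false_eq_true, ih] <;>
      refine Prod.ext ?_ ?_ <;> simp <;> omega

-- ===== VERDICT (by name: the statement is the Claim_ definition above) =====
theorem count_true_and_false_positives_top100_spec : Claim_equal_count_true_and_false_positives_top100 := by
  intro P K _
  unfold Spec_count_true_and_false_positives_top100
  unfold count_true_and_false_positives_top100 count_true_and_false_positives_top100_alt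
  simp only []
  rw [pv_foldl_pair, pv_foldl_count]
  have hc : (P.map (fun l => PySem.Str.strip l)).countP
      (fun predicted => (K.map (fun l => PySem.Str.strip l)).any
        (fun known => PySem.Str.startswith predicted known))
      = P.countP (fun lineage =>
          (PySem.List.pyRange 0 (PySem.Str.len (PySem.Str.strip lineage) + 1)).any
            (fun i => (PySem.Set.ofList (K.map (fun k => PySem.Str.strip k))).contains
              (PySem.Str.slice (PySem.Str.strip lineage) none (some i)))) := by
    rw [List.countP_map]
    apply List.countP_congr
    intro x _
    simp only [Function.comp_apply, pv_hit_eq]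
  simp only [hc, List.length_map]
  refine Prod.ext (by simp) (by simp)
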